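-- pv_equiv track=rewrite | github.com/AliiiBenn/last-qr-code | src/core/data_processing.py | text_to_padded_bits
-- ===== SOURCE A (Python) =====
-- def text_to_padded_bits(text: str, target_bit_length: int) -> str:
--     """
--     Convertit un texte en une chaîne de bits (UTF-8) et ajoute un padding de '0'
--     pour atteindre target_bit_length.
--     Lève une ValueError si le texte encodé est déjà plus long que target_bit_length.
--     """
--     byte_array = text.encode('utf-8')
--     bits_list = []
--     for byte in byte_array:
--         bits_list.append(format(byte, '08b'))
--
--     data_bits = "".join(bits_list)
--
--     if len(data_bits) > target_bit_length:
--         raise ValueError(f"Encoded text ({len(data_bits)} bits) is longer than target bit length ({target_bit_length} bits).")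
--
--     padding_length = target_bit_length - len(data_bits)
--     padded_bits = data_bits + '0' * padding_length
--     return padded_bits
-- ===== SOURCE B (Python) =====
-- def text_to_padded_bits(text: str, target_bit_length: int) -> str:
--     byte_array = text.encode('utf-8')
--     if byte_array:
--         n = int.from_bytes(byte_array, 'big')
--         data_bits = format(n, '0' + str(8 * len(byte_array)) + 'b')
--     else:
--         data_bits = ''
--     if len(data_bits) > target_bit_length:
--         raise ValueError(f"Encoded text ({len(data_bits)} bits) is longer than target bit length ({target_bit_length} bits).")
--     return data_bits + '0' * (target_bit_length - len(data_bits))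
-- ===== Notes on version B (the rewrite author's own statement) =====
-- stated objective: alternative
-- what changed: The per-byte loop building '08b' chunks and joining them is replaced by one int.from_bytes conversion of the whole byte string and a single zero-padded binary format of that integer.
import Mathlib
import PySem

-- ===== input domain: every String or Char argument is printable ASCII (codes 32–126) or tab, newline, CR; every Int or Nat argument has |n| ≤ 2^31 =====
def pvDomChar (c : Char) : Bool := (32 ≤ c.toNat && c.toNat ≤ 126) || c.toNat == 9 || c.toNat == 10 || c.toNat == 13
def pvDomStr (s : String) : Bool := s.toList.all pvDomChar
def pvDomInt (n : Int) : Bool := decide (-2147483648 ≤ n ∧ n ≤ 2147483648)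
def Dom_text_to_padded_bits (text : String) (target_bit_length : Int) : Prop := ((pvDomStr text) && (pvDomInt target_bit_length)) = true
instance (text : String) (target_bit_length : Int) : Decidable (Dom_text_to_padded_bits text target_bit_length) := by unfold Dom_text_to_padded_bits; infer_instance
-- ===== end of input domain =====

-- B replaces A's per-byte format/join loop by one big-integer conversion of the whole
-- byte string and a single zero-padded binary format (objective: alternative).

-- Shared model of Python's `format(n, '0<w>b')` for n ≥ 0 (used by both Pythons via `format`):
-- binary digits of n, most significant first (n = 0 ↦ "0"), left-padded with '0' to width w.
def pvNatToBin (n : Nat) : List Char :=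
  if _h : n < 2 then [if n = 1 then '1' else '0']
  else pvNatToBin (n / 2) ++ [if n % 2 = 1 then '1' else '0']
decreasing_by exact Nat.div_lt_self (by omega) (by omega)

def pvFormatBin (w : Nat) (n : Nat) : List Char :=
  let s := pvNatToBin n
  List.replicate (w - s.length) '0' ++ s

-- ===== PORT A =====
def text_to_padded_bits (text : String) (target_bit_length : Int) : String :=
  -- text.encode('utf-8'): exact on Dom (ASCII ⇒ one byte per char, equal to the code point)
  let byteArray : List Nat := text.toList.map (fun c => c.toNat)
  let bitsList : List (List Char) :=
    byteArray.foldl (fun acc b => acc ++ [pvFormatBin 8 b]) []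
  let dataBits : List Char := bitsList.flatten   -- "".join(bits_list)
  -- the `raise ValueError` branch (len(data_bits) > target_bit_length) is excluded by Pre_
  let paddingLength : Int := target_bit_length - (dataBits.length : Int)
  String.ofList (dataBits ++ List.replicate paddingLength.toNat '0')   -- '0' * negative = ''

-- ===== PORT B =====
def text_to_padded_bits_alt (text : String) (target_bit_length : Int) : String :=
  let byteArray : List Nat := text.toList.map (fun c => c.toNat)
  let dataBits : List Char :=
    if byteArray.isEmpty then []
    else
      let n := byteArray.foldl (fun a b => a * 256 + b) 0   -- int.from_bytes(byte_array, 'big')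
      pvFormatBin (8 * byteArray.length) n
  -- the `raise ValueError` branch is excluded by Pre_
  String.ofList (dataBits ++ List.replicate (target_bit_length - (dataBits.length : Int)).toNat '0')

-- ===== PRECONDITION & SPEC =====
-- Pre_ excludes exactly the inputs where A raises ValueError (encoded text longer than target);
-- on Dom every char encodes to one UTF-8 byte, so the encoded length is 8 * |text|.
def Pre_text_to_padded_bits (text : String) (target_bit_length : Int) : Prop :=
  8 * (text.toList.length : Int) ≤ target_bit_length
instance (text : String) (target_bit_length : Int) : Decidable (Pre_text_to_padded_bits text target_bit_length) := by unfold Pre_text_to_padded_bits; infer_instance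

def pvWitness_text_to_padded_bits : String × Int := ("Hi", 24)

def Spec_text_to_padded_bits (text : String) (target_bit_length : Int) (out : String) : Prop := out = text_to_padded_bits_alt text target_bit_length
instance (text : String) (target_bit_length : Int) (out : String) : Decidable (Spec_text_to_padded_bits text target_bit_length out) := by unfold Spec_text_to_padded_bits; infer_instance

-- ===== CLAIM (what is proved, stated in full; the proofs are below) =====
def Claim_equal_text_to_padded_bits : Prop := ∀ (text : String) (target_bit_length : Int), Dom_text_to_padded_bits text target_bit_length → Pre_text_to_padded_bits text target_bit_length → Spec_text_to_padded_bits text target_bit_length (text_to_padded_bits text target_bit_length)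

-- ===== LEMMAS AND PROOFS =====

-- big-endian binary rendering of n with EXACTLY w digits (n < 2^w)
def pvBitsExact : Nat → Nat → List Char
  | 0, _ => []
  | w + 1, n => pvBitsExact w (n / 2) ++ [if n % 2 = 1 then '1' else '0']

theorem pvBitsExact_zero (w : Nat) : pvBitsExact w 0 = List.replicate w '0' := by
  induction w with
  | zero => rfl
  | succ w ih =>
    simp [pvBitsExact, ih, List.replicate_succ' (n := w)]

theorem pvNatToBin_small (n : Nat) (h : n < 2) :
    pvNatToBin n = [if n = 1 then '1' else '0'] := by
  rw [pvNatToBin]; simp [h]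

theorem pvNatToBin_big (n : Nat) (h : ¬ n < 2) :
    pvNatToBin n = pvNatToBin (n / 2) ++ [if n % 2 = 1 then '1' else '0'] := by
  rw [pvNatToBin]; simp [h]

theorem pvFormatBin_eq_bitsExact (w n : Nat) (hw : 1 ≤ w) (hn : n < 2 ^ w) :
    pvFormatBin w n = pvBitsExact w n := by
  induction w generalizing n with
  | zero => omega
  | succ w ih =>
    by_cases h2 : n < 2
    · -- one digit, pad with w zeros
      have hn2 : n / 2 = 0 := by omega
      have hm : n % 2 = n := by omega
      simp only [pvFormatBin, pvNatToBin_small n h2, pvBitsExact, hn2, pvBitsExact_zero,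
        List.length_singleton, hm]
      rw [show w + 1 - 1 = w from by omega]
    · have hw1 : 1 ≤ w := by
        by_contra hc
        have : w = 0 := by omega
        subst this
        simp at hn; omega
      have hdiv : n / 2 < 2 ^ w := by
        have hp : 2 ^ (w + 1) = 2 ^ w * 2 := by rw [pow_succ]
        rw [hp] at hn
        omega
      have ihx := ih (n / 2) hw1 hdiv
      simp only [pvFormatBin, pvNatToBin_big n h2, pvBitsExact, List.length_append,
        List.length_singleton]
      rw [← ihx]
      simp only [pvFormatBin]
      rw [show w + 1 - ((pvNatToBin (n / 2)).length + 1) = w - (pvNatToBin (n / 2)).length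
          from by omega]
      simp [List.append_assoc]

theorem pvBitsExact_split (w k a b : Nat) (hb : b < 2 ^ k) :
    pvBitsExact (w + k) (a * 2 ^ k + b) = pvBitsExact w a ++ pvBitsExact k b := by
  induction k generalizing b with
  | zero =>
    have hb0 : b = 0 := by simpa using hb
    simp [hb0, pvBitsExact]
  | succ k ih =>
    have hp : a * 2 ^ (k + 1) = (a * 2 ^ k) * 2 := by rw [pow_succ]; ring
    have hdiv : (a * 2 ^ (k + 1) + b) / 2 = a * 2 ^ k + b / 2 := by rw [hp]; omega
    have hmod : (a * 2 ^ (k + 1) + b) % 2 = b % 2 := by rw [hp]; omega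
    have hb2 : b / 2 < 2 ^ k := by
      have hq : 2 ^ (k + 1) = 2 ^ k * 2 := by rw [pow_succ]
      rw [hq] at hb
      omega
    have hrec := ih (b / 2) hb2
    rw [show w + (k + 1) = (w + k) + 1 from by omega]
    simp only [pvBitsExact, hdiv, hmod, hrec, List.append_assoc]

-- foldl over bytes accumulates exactly the big-endian concatenation
theorem pvFold_bits (bs : List Nat) (hb : ∀ b ∈ bs, b < 256) (w a : Nat) (ha : a < 2 ^ w) :
    pvBitsExact (w + 8 * bs.length) (bs.foldl (fun a b => a * 256 + b) a)
      = pvBitsExact w a ++ (bs.map (pvBitsExact 8)).flatten := by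
  induction bs generalizing w a with
  | nil => simp
  | cons b bs ih =>
    have hblt : b < 256 := hb b (by simp)
    have ha' : a * 256 + b < 2 ^ (w + 8) := by
      have : a + 1 ≤ 2 ^ w := ha
      have : (a + 1) * 256 ≤ 2 ^ w * 256 := Nat.mul_le_mul_right _ this
      have h2 : 2 ^ (w + 8) = 2 ^ w * 256 := by rw [pow_add]; norm_num
      omega
    have ihx := ih (fun x hx => hb x (by simp [hx])) (w + 8) (a * 256 + b) ha'
    have hsplit : pvBitsExact (w + 8) (a * 256 + b) = pvBitsExact w a ++ pvBitsExact 8 b := by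
      have := pvBitsExact_split w 8 a b (by omega)
      simpa using this
    simp only [List.foldl_cons, List.length_cons, List.map_cons, List.flatten_cons]
    rw [show w + 8 * (bs.length + 1) = (w + 8) + 8 * bs.length from by ring]
    rw [ihx, hsplit, List.append_assoc]

-- A's foldl-with-append builds the map
theorem pvFoldAppend_map (bs : List Nat) (acc : List (List Char)) :
    bs.foldl (fun acc b => acc ++ [pvFormatBin 8 b]) acc = acc ++ bs.map (pvFormatBin 8) := by
  induction bs generalizing acc with
  | nil => simp
  | cons b bs ih => simp [ih, List.append_assoc]

-- the two data-bit strings coincide on Dom (all bytes < 256)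
theorem pvDataBits_eq (bs : List Nat) (hb : ∀ b ∈ bs, b < 256) :
    (bs.foldl (fun acc b => acc ++ [pvFormatBin 8 b]) []).flatten
      = if bs.isEmpty then []
        else pvFormatBin (8 * bs.length) (bs.foldl (fun a b => a * 256 + b) 0) := by
  cases bs with
  | nil => simp
  | cons b bs =>
    rw [pvFoldAppend_map]
    have hlen : 1 ≤ 8 * (b :: bs).length := by simp; omega
    have hfold : (b :: bs).foldl (fun a b => a * 256 + b) 0 < 2 ^ (8 * (b :: bs).length) := by
      -- from pvFold_bits via lengths, but easier: direct bound by induction is avoided;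
      -- use the rendering equality's length instead
      have h := pvFold_bits (b :: bs) hb 0 0 (by norm_num)
      -- derive bound separately
      clear h
      have : ∀ (l : List Nat), (∀ x ∈ l, x < 256) → ∀ a w, a < 2 ^ w →
          l.foldl (fun a b => a * 256 + b) a < 2 ^ (w + 8 * l.length) := by
        intro l
        induction l with
        | nil => intro _ a w ha; simpa using ha
        | cons x xs ih =>
          intro hl a w ha
          have hx : x < 256 := hl x (by simp)
          have ha' : a * 256 + x < 2 ^ (w + 8) := by
            have : a + 1 ≤ 2 ^ w := ha
            have : (a + 1) * 256 ≤ 2 ^ w * 256 := Nat.mul_le_mul_right _ this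
            have h2 : 2 ^ (w + 8) = 2 ^ w * 256 := by rw [pow_add]; norm_num
            omega
          have := ih (fun y hy => hl y (by simp [hy])) (a * 256 + x) (w + 8) ha'
          simpa [List.foldl_cons, show (w + 8) + 8 * xs.length = w + 8 * (xs.length + 1) from by ring] using this
      simpa using this (b :: bs) hb 0 0 (by norm_num)
    rw [if_neg (by simp)]
    rw [pvFormatBin_eq_bitsExact _ _ hlen hfold]
    have h := pvFold_bits (b :: bs) hb 0 0 (by norm_num)
    simp only [pvBitsExact, Nat.zero_add] at h
    rw [h]
    congr 1
    apply List.map_congr_left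
    intro x hx
    exact pvFormatBin_eq_bitsExact 8 x (by omega) (by have := hb x hx; omega)

-- ===== VERDICT (by name: the statement is the Claim_ definition above) =====
theorem text_to_padded_bits_spec : Claim_equal_text_to_padded_bits := by
  intro text tbl hdom _hpre
  unfold Spec_text_to_padded_bits text_to_padded_bits text_to_padded_bits_alt
  have hb : ∀ b ∈ text.toList.map (fun c => c.toNat), b < 256 := by
    intro b hbmem
    rcases List.mem_map.mp hbmem with ⟨c, hc, rfl⟩
    unfold Dom_text_to_padded_bits pvDomStr at hdom
    simp only [Bool.and_eq_true, List.all_eq_true] at hdom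
    have := hdom.1 c hc
    unfold pvDomChar at this
    simp only [Bool.or_eq_true, Bool.and_eq_true, decide_eq_true_eq, beq_iff_eq] at this
    omega
  have hd := pvDataBits_eq (text.toList.map (fun c => c.toNat)) hb
  simp only []
  rw [hd]
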